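-- pv_equiv track=rewrite | github.com/Jaeyeop-Jung/CodingTest | 프로그래머스/Lv2/1회차/Lv2. 우박수열 정적분.py | getUbak
-- ===== SOURCE A (Python) =====
-- def getUbak(k):
--     ubak = [[0, k]]
--     cnt = 1
--     while k != 1:
--         if k % 2 == 0:
--             k //= 2
--         else:
--             k = k * 3 + 1
--         ubak.append([cnt, k])
--         cnt += 1
--     return ubak
-- ===== SOURCE B (Python) =====
-- def getUbak(k):
--     # Recursive formulation: the table for k is [0, k] followed by the table
--     # for the Collatz successor of k with every step index shifted up by one.
--     if k == 1:
--         return [[0, 1]]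
--     nxt = k // 2 if k % 2 == 0 else 3 * k + 1
--     return [[0, k]] + [[i + 1, v] for i, v in getUbak(nxt)]
-- ===== Notes on version B (the rewrite author's own statement) =====
-- stated objective: alternative
-- what changed: Replaces A's iterative forward loop with a running counter and an appended accumulator by a recursion on the Collatz successor that builds the table back-to-front, attaching indices by shifting every index of the sub-result up by one.
import Mathlib
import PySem

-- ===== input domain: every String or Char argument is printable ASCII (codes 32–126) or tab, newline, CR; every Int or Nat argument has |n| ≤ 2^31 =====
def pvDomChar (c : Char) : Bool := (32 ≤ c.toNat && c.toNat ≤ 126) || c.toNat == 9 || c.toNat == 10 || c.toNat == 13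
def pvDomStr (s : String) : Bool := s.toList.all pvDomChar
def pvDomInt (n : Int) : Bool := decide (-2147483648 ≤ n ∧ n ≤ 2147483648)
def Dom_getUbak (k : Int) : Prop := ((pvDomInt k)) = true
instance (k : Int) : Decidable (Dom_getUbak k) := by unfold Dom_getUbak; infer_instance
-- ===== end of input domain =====

-- B replaces A's iterative counter-and-append loop by recursion on the Collatz
-- successor, shifting the sub-result's indices up by one ('alternative', no speed claim).
-- Both A's while-loop and B's recursion are ported with the same fuel bound (pvFuel),
-- which only makes the computation total; equivalence is proved for every fuel.

def pvFuel : Nat := 100000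

-- ===== PORT A =====
def getUbakLoop : Nat → Int → Int → List (List Int) → List (List Int)
  | 0, _, _, ubak => ubak
  | fuel + 1, k, cnt, ubak =>
    if k = 1 then ubak
    else
      let k' := if PySem.Int.mod k 2 = 0 then PySem.Int.floordiv k 2 else k * 3 + 1
      getUbakLoop fuel k' (cnt + 1) (ubak ++ [[cnt, k']])

def getUbak (k : Int) : List (List Int) :=
  getUbakLoop pvFuel k 1 [[0, k]]

-- ===== PORT B =====
-- the 'for i, v in …' destructuring: exact, since every element has length 2.
def pvShift (l : List Int) : List Int :=
  match l with
  | [i, v] => [i + 1, v]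
  | _ => []

def getUbakRec : Nat → Int → List (List Int)
  | 0, k => [[0, k]]
  | fuel + 1, k =>
    if k = 1 then [[0, 1]]
    else
      let nxt := if PySem.Int.mod k 2 = 0 then PySem.Int.floordiv k 2 else 3 * k + 1
      [[0, k]] ++ (getUbakRec fuel nxt).map pvShift

def getUbak_alt (k : Int) : List (List Int) :=
  getUbakRec pvFuel k

-- ===== PRECONDITION & SPEC =====
def Spec_getUbak (k : Int) (out : List (List Int)) : Prop := out = getUbak_alt k
instance (k : Int) (out : List (List Int)) : Decidable (Spec_getUbak k out) := by unfold Spec_getUbak; infer_instance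

-- ===== CLAIM (what is proved, stated in full; the proofs are below) =====
def Claim_equal_getUbak : Prop := ∀ (k : Int), Dom_getUbak k → Spec_getUbak k (getUbak k)

-- ===== LEMMAS AND PROOFS =====

-- value sequence after k, used only to state the common characterisation
def genSeq : Nat → Int → List Int
  | 0, _ => []
  | fuel + 1, k =>
    if k = 1 then []
    else
      let k' := if PySem.Int.mod k 2 = 0 then PySem.Int.floordiv k 2 else 3 * k + 1
      k' :: genSeq fuel k'

def pairFn (p : Int × Int) : List Int := [p.1, p.2]

theorem getUbakLoop_eq (fuel : Nat) :
    ∀ (k cnt : Int) (acc : List (List Int)),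
      getUbakLoop fuel k cnt acc
        = acc ++ ((PySem.List.enumerate (genSeq fuel k) cnt).map pairFn) := by
  induction fuel with
  | zero => intro k cnt acc; simp [getUbakLoop, genSeq, PySem.List.enumerate_nil]
  | succ n ih =>
    intro k cnt acc
    by_cases hk : k = 1
    · simp [getUbakLoop, genSeq, hk, PySem.List.enumerate_nil]
    · simp only [getUbakLoop, genSeq, if_neg hk, show k * 3 + 1 = 3 * k + 1 from by ring]
      rw [ih]
      simp [PySem.List.enumerate_cons, pairFn]

theorem map_shift_enumerate (s : List Int) :
    ∀ (n : Int), ((PySem.List.enumerate s n).map pairFn).map pvShift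
      = (PySem.List.enumerate s (n + 1)).map pairFn := by
  induction s with
  | nil => intro n; simp [PySem.List.enumerate_nil]
  | cons x xs ih =>
    intro n
    simp [PySem.List.enumerate_cons, pairFn, pvShift, ih]

theorem getUbakRec_eq (fuel : Nat) :
    ∀ (k : Int), getUbakRec fuel k
      = [[0, k]] ++ ((PySem.List.enumerate (genSeq fuel k) 1).map pairFn) := by
  induction fuel with
  | zero => intro k; simp [getUbakRec, genSeq, PySem.List.enumerate_nil]
  | succ n ih =>
    intro k
    by_cases hk : k = 1
    · simp [getUbakRec, genSeq, hk, PySem.List.enumerate_nil]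
    · simp only [getUbakRec, genSeq, if_neg hk]
      rw [ih]
      simp only [List.map_append, List.map_map, List.map_cons, List.map_nil]
      rw [← List.map_map, map_shift_enumerate]
      simp [PySem.List.enumerate_cons, pairFn, pvShift]

theorem getUbak_spec : Claim_equal_getUbak := by
  intro k _
  unfold Spec_getUbak getUbak getUbak_alt
  rw [getUbakLoop_eq, getUbakRec_eq]
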